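-- pv_equiv track=rewrite | github.com/Gian44/chronoswarm | model.py | room_stability_cost
-- ===== SOURCE A (Python) =====
-- s2 = 1 # Weight of Room Stability constraint
--
-- def room_stability_cost(timetable):
--     cost = 0
--     course_rooms = {}
--     # Iterate through the timetable
--     for day in timetable:
--         for period in timetable[day]:
--             for room in timetable[day][period]:
--                 course = timetable[day][period][room]
--                 if course != -1:  # Ignore unassigned slots
--                     if course not in course_rooms:
--                         course_rooms[course] = set()  # Initialize a set for unique rooms
--                     if room not in course_rooms[course]:
--                         course_rooms[course].add(room)
--     for course in course_rooms:
--         cost += s2 * (len(course_rooms[course])-1)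
--     return cost
-- ===== SOURCE B (Python) =====
-- s2 = 1 # Weight of Room Stability constraint
--
-- def room_stability_cost(timetable):
--     pairs = sorted((course, room)
--                    for periods in timetable.values()
--                    for rooms in periods.values()
--                    for room, course in rooms.items()
--                    if course != -1)
--     cost = 0
--     prev = None
--     for pair in pairs:
--         if prev is not None and pair[0] == prev[0] and pair != prev:
--             cost += s2
--         prev = pair
--     return cost
-- ===== Notes on version B (the rewrite author's own statement) =====
-- stated objective: alternative
-- what changed: Replaces the dict-of-room-sets plus per-course summation with a sort-then-scan: flatten to (course, room) pairs, sort lexicographically, and count adjacent pairs that differ while sharing the course, which equals sum over courses of (distinct rooms - 1).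
import Mathlib
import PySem

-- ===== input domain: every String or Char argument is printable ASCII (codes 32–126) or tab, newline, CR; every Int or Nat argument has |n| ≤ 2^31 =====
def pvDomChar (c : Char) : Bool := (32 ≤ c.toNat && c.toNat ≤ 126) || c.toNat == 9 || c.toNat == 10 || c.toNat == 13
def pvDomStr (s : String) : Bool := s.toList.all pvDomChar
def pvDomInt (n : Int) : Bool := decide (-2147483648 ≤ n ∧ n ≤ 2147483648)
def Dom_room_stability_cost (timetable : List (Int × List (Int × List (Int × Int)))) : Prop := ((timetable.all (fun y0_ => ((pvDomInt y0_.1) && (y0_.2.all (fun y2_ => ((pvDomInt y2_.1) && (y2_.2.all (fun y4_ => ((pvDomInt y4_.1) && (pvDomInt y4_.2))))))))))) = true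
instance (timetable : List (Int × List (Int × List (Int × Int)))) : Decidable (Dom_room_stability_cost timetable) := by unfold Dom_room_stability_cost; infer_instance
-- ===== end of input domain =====

-- B replaces A's dict-of-room-sets and final summation pass by sort-then-scan: flatten to
-- (course, room) pairs, sort, count adjacent-distinct pairs within equal-course runs (objective: alternative).

def s2 : Int := 1

-- ===== PORT A =====
def room_stability_cost (timetable : List (Int × List (Int × List (Int × Int)))) : Int :=
  let course_rooms : PySem.Dict Int (PySem.Set Int) :=
    timetable.foldl (fun d day =>
      day.2.foldl (fun d period =>
        period.2.foldl (fun d slot =>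
          let room := slot.1
          let course := slot.2
          if course ≠ -1 then
            let d1 := if d.contains course then d else d.insert course PySem.Set.empty
            if (d1.getD course PySem.Set.empty).contains room then d1
            else d1.insert course (PySem.Set.add (d1.getD course PySem.Set.empty) room)
          else d) d) d) PySem.Dict.empty
  course_rooms.keys.foldl (fun cost course =>
    cost + s2 * (PySem.Set.len (course_rooms.getD course PySem.Set.empty) - 1)) 0

-- ===== PORT B =====
-- sorted() on 2-tuples of ints compares lexicographically = PySem's tuple-key sort sorted2 fst snd
def room_stability_cost_alt (timetable : List (Int × List (Int × List (Int × Int)))) : Int :=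
  let pairs := PySem.List.sorted2
    (timetable.flatMap (fun periods => periods.2.flatMap (fun rooms =>
      rooms.2.filterMap (fun s => if s.2 ≠ -1 then some (s.2, s.1) else none))))
    Prod.fst Prod.snd
  let r := pairs.foldl (fun (st : Int × Option (Int × Int)) pair =>
      match st.2 with
      | some prev =>
        (if pair.1 == prev.1 && pair != prev then st.1 + s2 else st.1, some pair)
      | none => (st.1, some pair)) (0, (none : Option (Int × Int)))
  r.1

-- ===== PRECONDITION & SPEC =====
def Spec_room_stability_cost (timetable : List (Int × List (Int × List (Int × Int)))) (out : Int) : Prop := out = room_stability_cost_alt timetable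
instance (timetable : List (Int × List (Int × List (Int × Int)))) (out : Int) : Decidable (Spec_room_stability_cost timetable out) := by unfold Spec_room_stability_cost; infer_instance

-- ===== CLAIM (what is proved, stated in full; the proofs are below) =====
def Claim_equal_room_stability_cost : Prop := ∀ (timetable : List (Int × List (Int × List (Int × Int)))), Dom_room_stability_cost timetable → Spec_room_stability_cost timetable (room_stability_cost timetable)

-- ===== LEMMAS AND PROOFS =====

-- A's per-slot update (exactly the inner lambda of port A)
def stepA (d : PySem.Dict Int (PySem.Set Int)) (slot : Int × Int) : PySem.Dict Int (PySem.Set Int) :=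
  let room := slot.1
  let course := slot.2
  if course ≠ -1 then
    let d1 := if d.contains course then d else d.insert course PySem.Set.empty
    if (d1.getD course PySem.Set.empty).contains room then d1
    else d1.insert course (PySem.Set.add (d1.getD course PySem.Set.empty) room)
  else d

-- proof-side reference: the distinct (course, room) pairs and distinct courses as flat sets
def stepB (st : PySem.Set (Int × Int) × PySem.Set Int) (slot : Int × Int) : PySem.Set (Int × Int) × PySem.Set Int :=
  if slot.2 ≠ -1 then
    (PySem.Set.add st.1 (slot.2, slot.1), PySem.Set.add st.2 slot.2)
  else st

def slotsOf (timetable : List (Int × List (Int × List (Int × Int)))) : List (Int × Int) :=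
  timetable.flatMap (fun day => day.2.flatMap (fun period => period.2))

theorem foldl_flatMap' {α β σ : Type} (f : α → List β) (g : σ → β → σ) :
    ∀ (l : List α) (i : σ), (l.flatMap f).foldl g i = l.foldl (fun s x => (f x).foldl g s) i := by
  intro l
  induction l with
  | nil => intro i; rfl
  | cons a t ih => intro i; simp only [List.flatMap_cons, List.foldl_append, List.foldl_cons, ih]

theorem foldl_slots {σ : Type} (g : σ → Int × Int → σ)
    (tt : List (Int × List (Int × List (Int × Int)))) (i : σ) :
    tt.foldl (fun s day => day.2.foldl (fun s period => period.2.foldl g s) s) i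
      = (slotsOf tt).foldl g i := by
  unfold slotsOf
  rw [foldl_flatMap']
  have h : (fun (s : σ) (day : Int × List (Int × List (Int × Int))) =>
        (day.2.flatMap (fun period => period.2)).foldl g s)
      = (fun s day => day.2.foldl (fun s period => period.2.foldl g s) s) := by
    funext s day
    rw [foldl_flatMap']
  rw [h]

-- the invariant tying A's dict-of-sets to the reference pair of sets
def SlotInv (d : PySem.Dict Int (PySem.Set Int)) (p : PySem.Set (Int × Int)) (c : PySem.Set Int) : Prop :=
  d.keys.Nodup ∧
  (∀ x : Int, d.contains x = c.contains x) ∧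
  (∀ x r : Int, p.contains (x, r) = (d.getD x PySem.Set.empty).contains r) ∧
  c.length = d.size ∧
  p.length = (d.values.map List.length).sum

theorem sum_len_replace (course : Int) (v : PySem.Set Int) :
    ∀ (l : List (Int × PySem.Set Int)), (l.map (·.1)).Nodup → ∀ (old : PySem.Set Int), (course, old) ∈ l →
    (((l.map (fun p => if p.1 == course then (course, v) else p)).map (·.2)).map List.length).sum + old.length
      = ((l.map (·.2)).map List.length).sum + v.length := by
  intro l
  induction l with
  | nil => intro _ old h; cases h
  | cons a t ih =>
    intro hnd old hmem
    have hnd' : (a.1 :: t.map (·.1)).Nodup := by simpa using hnd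
    obtain ⟨hna, hndt⟩ := List.nodup_cons.mp hnd'
    by_cases hk : a.1 = course
    · have holdv : old = a.2 := by
        rcases List.mem_cons.mp hmem with h | h
        · rw [← h]
        · exfalso
          apply hna
          rw [hk]
          exact List.mem_map.mpr ⟨(course, old), h, rfl⟩
      have ht : t.map (fun p => if p.1 == course then (course, v) else p) = t := by
        conv_rhs => rw [← List.map_id t]
        apply List.map_congr_left
        intro p hp
        have hne : (p.1 == course) = false := by
          simp only [beq_eq_false_iff_ne, ne_eq]
          intro hc
          apply hna
          rw [hk, ← hc]
          exact List.mem_map.mpr ⟨p, hp, rfl⟩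
        simp [hne]
      have hbeq : (a.1 == course) = true := by simp [hk]
      simp only [List.map_cons, List.sum_cons, hbeq, if_true, ht, holdv]
      omega
    · have hmem' : (course, old) ∈ t := by
        rcases List.mem_cons.mp hmem with h | h
        · exact absurd (by rw [← h]) hk
        · exact h
      have hbeq : (a.1 == course) = false := by simp [hk]
      have := ih hndt old hmem'
      simp only [List.map_cons, List.sum_cons, hbeq, Bool.false_eq_true, if_false]
      omega

theorem slotInv_step (d : PySem.Dict Int (PySem.Set Int)) (p : PySem.Set (Int × Int)) (c : PySem.Set Int)
    (slot : Int × Int) (h : SlotInv d p c) :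
    SlotInv (stepA d slot) (stepB (p, c) slot).1 (stepB (p, c) slot).2 := by
  obtain ⟨hnd, hc, hp, hlc, hlp⟩ := h
  obtain ⟨room, course⟩ := slot
  have hpm : ∀ x r : Int, (x, r) ∈ p ↔ r ∈ d.getD x PySem.Set.empty := by
    intro x r
    have := hp x r
    simpa [PySem.Set.contains, List.contains_eq_mem] using this
  by_cases hcourse : course = -1
  · simpa [stepA, stepB, hcourse] using ⟨hnd, hc, hp, hlc, hlp⟩
  · simp only [stepA, stepB, hcourse, ne_eq, not_false_iff, if_true]
    by_cases hin : d.contains course = true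
    · -- course already a key of d
      simp only [hin, if_true]
      have hcmem : c.contains course = true := by rw [← hc]; exact hin
      have hcmemm : course ∈ c := by simpa [PySem.Set.contains, List.contains_eq_mem] using hcmem
      have ec : PySem.Set.add c course = c := by simp [PySem.Set.add, hcmemm]
      by_cases hroom : (d.getD course PySem.Set.empty).contains room = true
      · -- room already recorded: both sides unchanged
        have hpmemm : (course, room) ∈ p := by
          rw [hpm]
          simpa [PySem.Set.contains, List.contains_eq_mem] using hroom
        have ep : PySem.Set.add p (course, room) = p := by simp [PySem.Set.add, hpmemm]
        rw [if_pos hroom, ep, ec]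
        exact ⟨hnd, hc, hp, hlc, hlp⟩
      · -- new room for an existing course
        have hroom' : (d.getD course PySem.Set.empty).contains room = false := by simpa using hroom
        have hroomm : room ∉ d.getD course ([] : PySem.Set Int) := by
          simpa [PySem.Set.contains, List.contains_eq_mem, PySem.Set.empty] using hroom'
        have hpmemm : (course, room) ∉ p := by
          rw [hpm]; simpa [PySem.Set.empty] using hroomm
        have eadd : PySem.Set.add (d.getD course PySem.Set.empty) room
            = d.getD course PySem.Set.empty ++ [room] := by simp [PySem.Set.add, hroomm]
        have ep : PySem.Set.add p (course, room) = p ++ [(course, room)] := by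
          simp [PySem.Set.add, hpmemm]
        rw [if_neg hroom, eadd, ep, ec]
        refine ⟨?_, ?_, ?_, ?_, ?_⟩
        · rwa [PySem.Dict.keys_insert_of_contains d _ hin]
        · intro x
          rw [PySem.Dict.contains_insert]
          by_cases hx : x = course
          · simp [hx, hcmemm]
          · simp [hx, hc x]
        · intro x r
          rw [PySem.Dict.getD_insert]
          simp only [PySem.Set.contains, List.contains_eq_mem, decide_eq_decide, List.mem_append,
            List.mem_singleton, Prod.mk.injEq]
          by_cases hx : x = course
          · rw [if_pos hx, hpm x r]
            simp only [hx, List.mem_append, List.mem_singleton, true_and]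
          · rw [if_neg hx, hpm x r]
            constructor
            · rintro (h | h)
              · exact h
              · exact (hx h.1).elim
            · exact Or.inl
        · rwa [PySem.Dict.size_insert, if_pos hin]
        · have hget : d.get? course = some (d.getD course PySem.Set.empty) := by
            cases hg : d.get? course with
            | none =>
              exfalso
              have h2 := PySem.Dict.contains_eq_isSome_get? d course
              rw [hg] at h2; simp [h2] at hin
            | some v =>
              simp [PySem.Dict.getD_eq_get?_getD, hg]
          have hkey : (course, d.getD course PySem.Set.empty) ∈ d.items :=
            PySem.Dict.mem_items_of_get?_eq_some d hget
          have hrepl := sum_len_replace course ((d.getD course PySem.Set.empty) ++ [room]) d.items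
            (by simpa [PySem.Dict.keys] using hnd) (d.getD course PySem.Set.empty) hkey
          have hval : (d.insert course ((d.getD course PySem.Set.empty) ++ [room])).values
              = (d.items.map (fun q => if q.1 == course then (course, (d.getD course PySem.Set.empty) ++ [room]) else q)).map (·.2) := by
            rw [PySem.Dict.values, PySem.Dict.items_insert_of_contains d _ hin]
          rw [hval]
          rw [PySem.Dict.values] at hlp
          simp only [List.length_append, List.length_cons, List.length_nil,
            List.map_map] at hrepl hlp ⊢
          omega
    · -- fresh course
      have hin' : d.contains course = false := by simpa using hin
      have hcmem : c.contains course = false := by rw [← hc]; exact hin'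
      have hcmemm : course ∉ c := by simpa [PySem.Set.contains, List.contains_eq_mem] using hcmem
      have hgd : d.getD course PySem.Set.empty = PySem.Set.empty :=
        PySem.Dict.getD_of_not_contains d _ hin'
      have hpmemm : (course, room) ∉ p := by
        rw [hpm, hgd]
        simp [PySem.Set.empty]
      have ep : PySem.Set.add p (course, room) = p ++ [(course, room)] := by
        simp [PySem.Set.add, hpmemm]
      have ec : PySem.Set.add c course = c ++ [course] := by simp [PySem.Set.add, hcmemm]
      have esing : PySem.Set.add (PySem.Set.empty : PySem.Set Int) room = [room] := rfl
      rw [if_neg hin, PySem.Dict.getD_insert_self,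
        if_neg (by simp [PySem.Set.contains, PySem.Set.empty, List.contains_eq_mem]),
        PySem.Dict.insert_insert_self, esing, ep, ec]
      refine ⟨?_, ?_, ?_, ?_, ?_⟩
      · exact PySem.Dict.nodup_keys_insert d course _ hnd
      · intro x
        rw [PySem.Dict.contains_insert]
        by_cases hx : x = course
        · simp [hx, PySem.Set.contains, List.contains_eq_mem]
        · simp [hx, hc x, PySem.Set.contains, List.contains_eq_mem]
      · intro x r
        rw [PySem.Dict.getD_insert]
        simp only [PySem.Set.contains, List.contains_eq_mem, decide_eq_decide, List.mem_append,
          List.mem_singleton, Prod.mk.injEq]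
        by_cases hx : x = course
        · rw [if_pos hx, hpm x r]
          simp only [hx, hgd]
          simp [PySem.Set.empty]
        · rw [if_neg hx, hpm x r]
          constructor
          · rintro (h | h)
            · exact h
            · exact (hx h.1).elim
          · exact Or.inl
      · rw [PySem.Dict.size_insert, if_neg hin]
        simp only [List.length_append, List.length_singleton]
        omega
      · have hval : (d.insert course [room]).values = d.values ++ [[room]] := by
          rw [PySem.Dict.values, PySem.Dict.items_insert_of_not_contains d _ hin', PySem.Dict.values]
          simp
        rw [hval]
        simp only [List.map_append, List.sum_append, List.map_cons, List.map_nil,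
          List.length_append, List.length_cons, List.length_nil,
          List.sum_cons, List.sum_nil]
        omega

theorem slotInv_fold (slots : List (Int × Int)) :
    ∀ (d : PySem.Dict Int (PySem.Set Int)) (st : PySem.Set (Int × Int) × PySem.Set Int),
    SlotInv d st.1 st.2 → SlotInv (slots.foldl stepA d) (slots.foldl stepB st).1 (slots.foldl stepB st).2 := by
  induction slots with
  | nil => intro d st h; exact h
  | cons a t ih =>
    intro d st h
    simp only [List.foldl_cons]
    exact ih (stepA d a) (stepB st a) (slotInv_step d st.1 st.2 a h)

theorem foldl_add_eq_sum (f : Int → Int) : ∀ (l : List Int) (a : Int),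
    l.foldl (fun acc x => acc + f x) a = a + (l.map f).sum := by
  intro l
  induction l with
  | nil => intro a; simp
  | cons x t ih => intro a; simp [ih, add_assoc]

theorem sum_map_sub_one {α : Type} (f : α → Int) : ∀ (l : List α),
    (l.map (fun x => f x - 1)).sum = (l.map f).sum - l.length := by
  intro l
  induction l with
  | nil => simp
  | cons x t ih =>
    simp only [List.map_cons, List.sum_cons, ih, List.length_cons]
    push_cast
    ring

def finalA (d : PySem.Dict Int (PySem.Set Int)) : Int :=
  d.keys.foldl (fun cost course =>
    cost + s2 * (PySem.Set.len (d.getD course PySem.Set.empty) - 1)) 0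

theorem portA_eq (tt : List (Int × List (Int × List (Int × Int)))) :
    room_stability_cost tt = finalA ((slotsOf tt).foldl stepA PySem.Dict.empty) := by
  show finalA (tt.foldl (fun d day => day.2.foldl (fun d period => period.2.foldl stepA d) d) PySem.Dict.empty)
      = finalA ((slotsOf tt).foldl stepA PySem.Dict.empty)
  rw [foldl_slots]

-- A's value in terms of the two flat sets
theorem A_eq_sets (tt : List (Int × List (Int × List (Int × Int)))) :
    room_stability_cost tt
      = s2 * (PySem.Set.len ((slotsOf tt).foldl stepB (PySem.Set.empty, PySem.Set.empty)).1
          - PySem.Set.len ((slotsOf tt).foldl stepB (PySem.Set.empty, PySem.Set.empty)).2) := by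
  rw [portA_eq]
  unfold finalA
  have hinv : SlotInv ((slotsOf tt).foldl stepA PySem.Dict.empty)
      ((slotsOf tt).foldl stepB (PySem.Set.empty, PySem.Set.empty)).1
      ((slotsOf tt).foldl stepB (PySem.Set.empty, PySem.Set.empty)).2 := by
    apply slotInv_fold
    refine ⟨?_, ?_, ?_, rfl, rfl⟩
    · simp [PySem.Dict.keys, PySem.Dict.empty]
    · intro x; rfl
    · intro x r; rfl
  set d := (slotsOf tt).foldl stepA PySem.Dict.empty with hd
  set st := (slotsOf tt).foldl stepB (PySem.Set.empty, PySem.Set.empty) with hst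
  obtain ⟨hnd, _, _, hlc, hlp⟩ := hinv
  rw [foldl_add_eq_sum, zero_add]
  have hmap : d.keys.map (fun course => s2 * (PySem.Set.len (d.getD course PySem.Set.empty) - 1))
      = d.keys.map (fun course => PySem.Set.len (d.getD course PySem.Set.empty) - 1) := by
    simp [s2]
  rw [hmap, sum_map_sub_one]
  have hvals : (d.keys.map (fun course => PySem.Set.len (d.getD course PySem.Set.empty))).sum
      = (d.values.map PySem.Set.len).sum := by
    rw [PySem.Dict.values_eq_map_keys d hnd PySem.Set.empty, List.map_map]
    rfl
  rw [hvals]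
  have hcast : ∀ (l : List (PySem.Set Int)), (l.map PySem.Set.len).sum = ((l.map List.length).sum : Int) := by
    intro l
    induction l with
    | nil => simp
    | cons a t ih =>
      simp only [List.map_cons, List.sum_cons, ih, PySem.Set.len]
      push_cast
      ring
  have hlenp : (d.values.map PySem.Set.len).sum = PySem.Set.len st.1 := by
    rw [hcast, ← hlp]
    rfl
  have hlenc : (d.keys.length : Int) = PySem.Set.len st.2 := by
    have : d.keys.length = d.size := by rw [PySem.Dict.keys]; simp [PySem.Dict.size]
    rw [this, ← hlc]
    rfl
  rw [hlenp, hlenc]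
  simp [s2]

-- ---------- characterising the two flat sets by the flattened pair list ----------

def pairF (s : Int × Int) : Option (Int × Int) := if s.2 ≠ -1 then some (s.2, s.1) else none

def pairsOf (slots : List (Int × Int)) : List (Int × Int) := slots.filterMap pairF

theorem stepB_fold_spec : ∀ (slots : List (Int × Int)) (st : PySem.Set (Int × Int) × PySem.Set Int),
    st.1.Nodup → st.2.Nodup →
    (slots.foldl stepB st).1.Nodup ∧ (slots.foldl stepB st).2.Nodup ∧
    (∀ x, x ∈ (slots.foldl stepB st).1 ↔ x ∈ st.1 ∨ x ∈ pairsOf slots) ∧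
    (∀ y, y ∈ (slots.foldl stepB st).2 ↔ y ∈ st.2 ∨ y ∈ (pairsOf slots).map Prod.fst) := by
  intro slots
  induction slots with
  | nil =>
    intro st h1 h2
    refine ⟨h1, h2, fun x => ?_, fun y => ?_⟩ <;> simp [pairsOf]
  | cons a t ih =>
    intro st h1 h2
    simp only [List.foldl_cons]
    by_cases ha : a.2 = -1
    · have hstep : stepB st a = st := by simp [stepB, ha]
      have hpair : pairsOf (a :: t) = pairsOf t := by simp [pairsOf, pairF, ha]
      rw [hstep, hpair]
      exact ih st h1 h2
    · have hstep : stepB st a = (PySem.Set.add st.1 (a.2, a.1), PySem.Set.add st.2 a.2) := by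
        simp [stepB, ha]
      have hpair : pairsOf (a :: t) = (a.2, a.1) :: pairsOf t := by simp [pairsOf, pairF, ha]
      rw [hstep, hpair]
      obtain ⟨n1, n2, m1, m2⟩ := ih (PySem.Set.add st.1 (a.2, a.1), PySem.Set.add st.2 a.2)
        (PySem.Set.nodup_add st.1 _ h1) (PySem.Set.nodup_add st.2 _ h2)
      refine ⟨n1, n2, fun x => ?_, fun y => ?_⟩
      · rw [m1 x, PySem.Set.mem_add]
        simp only [List.mem_cons]
        tauto
      · rw [m2 y, PySem.Set.mem_add]
        simp only [List.map_cons, List.mem_cons]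
        tauto

-- ---------- the scan over the sorted pair list ----------

-- lexicographic ≤ on int pairs (Python's tuple order)
def LexLe (a b : Int × Int) : Prop := a.1 < b.1 ∨ (a.1 = b.1 ∧ a.2 ≤ b.2)

def lexLt (a b : Int × Int) : Bool :=
  decide (a.1 < b.1) || !decide (b.1 < a.1) && decide (a.2 < b.2)

theorem lexLt_false_iff (a b : Int × Int) : lexLt b a = false ↔ LexLe a b := by
  unfold lexLt LexLe
  simp only [Bool.or_eq_false_iff, Bool.and_eq_false_iff, Bool.not_eq_false',
    decide_eq_false_iff_not, decide_eq_true_eq, not_lt]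
  omega

theorem lexLt_trans (a b c : Int × Int) (h1 : lexLt a b = true) (h2 : lexLt b c = true) :
    lexLt a c = true := by
  unfold lexLt at *
  simp only [Bool.or_eq_true, Bool.and_eq_true, Bool.not_eq_true', decide_eq_false_iff_not,
    decide_eq_true_eq, not_lt] at *
  omega

theorem lexLt_irrefl (a : Int × Int) : lexLt a a = false := by
  unfold lexLt
  simp

theorem pairwise_insertBy_lex (x : Int × Int) :
    ∀ (l : List (Int × Int)), l.Pairwise (fun a b => lexLt b a = false) →
    (PySem.List.insertBy lexLt x l).Pairwise (fun a b => lexLt b a = false) := by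
  intro l
  induction l with
  | nil => intro _; simp [PySem.List.insertBy]
  | cons y ys ih =>
    intro h
    obtain ⟨hy, hys⟩ := List.pairwise_cons.mp h
    by_cases hxy : lexLt x y = true
    · have heq : PySem.List.insertBy lexLt x (y :: ys) = x :: y :: ys := by
        simp [PySem.List.insertBy, hxy]
      rw [heq]
      refine List.pairwise_cons.mpr ⟨?_, h⟩
      intro z hz
      by_cases hzx : lexLt z x = true
      · exfalso
        rcases List.mem_cons.mp hz with hz | hz
        · subst hz
          have := lexLt_trans z x z hzx hxy
          rw [lexLt_irrefl] at this
          exact Bool.false_ne_true this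
        · have hzy : lexLt z y = true := lexLt_trans z x y hzx hxy
          rw [hy z hz] at hzy
          exact Bool.false_ne_true hzy
      · simpa using hzx
    · have heq : PySem.List.insertBy lexLt x (y :: ys) = y :: PySem.List.insertBy lexLt x ys := by
        simp [PySem.List.insertBy, hxy]
      rw [heq]
      refine List.pairwise_cons.mpr ⟨?_, ih hys⟩
      intro z hz
      rcases (PySem.List.mem_insertBy lexLt x z ys).mp hz with hz | hz
      · subst hz
        simpa using hxy
      · exact hy z hz

theorem sorted2_pairwise_lex (xs : List (Int × Int)) :
    (PySem.List.sorted2 xs Prod.fst Prod.snd false).Pairwise (fun a b => lexLt b a = false) := by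
  show (xs.foldl (fun acc x => PySem.List.insertBy _ x acc) []).Pairwise _
  have key : ∀ (l : List (Int × Int)) (acc : List (Int × Int)),
      acc.Pairwise (fun a b => lexLt b a = false) →
      (l.foldl (fun acc x => PySem.List.insertBy lexLt x acc) acc).Pairwise (fun a b => lexLt b a = false) := by
    intro l
    induction l with
    | nil => intro acc h; exact h
    | cons a t ih =>
      intro acc h
      exact ih _ (pairwise_insertBy_lex a acc h)
  exact key xs [] (by simp)

theorem lexle_antisymm (a b : Int × Int) (h1 : LexLe a b) (h2 : LexLe b a) : a = b := by
  unfold LexLe at *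
  have : a.1 = b.1 ∧ a.2 = b.2 := by omega
  exact Prod.ext this.1 this.2

-- the scan step (exactly the inner lambda of port B)
def scanStep (st : Int × Option (Int × Int)) (pair : Int × Int) : Int × Option (Int × Int) :=
  match st.2 with
  | some prev => (if pair.1 == prev.1 && pair != prev then st.1 + s2 else st.1, some pair)
  | none => (st.1, some pair)

theorem scan_some : ∀ (l : List (Int × Int)) (p : Int × Int) (c0 : Int),
    (p :: l).Pairwise LexLe →
    (l.foldl scanStep (c0, some p)).1
      = c0 + ((p :: l).toFinset.card : Int) - (((p :: l).map Prod.fst).toFinset.card : Int) := by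
  intro l
  induction l with
  | nil =>
    intro p c0 _
    simp
  | cons a t ih =>
    intro p c0 hpw
    obtain ⟨hp, hat⟩ := List.pairwise_cons.mp hpw
    have hpa : LexLe p a := hp a List.mem_cons_self
    have hax : ∀ x ∈ t, LexLe a x := fun x hx => (List.pairwise_cons.mp hat).1 x hx
    simp only [List.foldl_cons]
    have hstep : scanStep (c0, some p) a
        = (if a.1 == p.1 && a != p then c0 + s2 else c0, some a) := rfl
    rw [hstep]
    by_cases hpeq : p = a
    · subst hpeq
      have hcond : (p.1 == p.1 && p != p) = false := by simp
      simp only [hcond, Bool.false_eq_true, if_false]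
      rw [ih p c0 hat]
      have h1 : (p :: p :: t).toFinset = (p :: t).toFinset := by
        simp [List.toFinset_cons]
      have h2 : ((p :: p :: t).map Prod.fst).toFinset = ((p :: t).map Prod.fst).toFinset := by
        simp [List.toFinset_cons]
      rw [h1, h2]
    · have hpnotin : p ∉ a :: t := by
        intro hmem
        rcases List.mem_cons.mp hmem with h | h
        · exact hpeq h
        · exact hpeq (lexle_antisymm p a hpa (by
            have h1 := hax p h
            have h2 := hp p (List.mem_cons_of_mem a h)
            unfold LexLe at *
            omega))
      have hcard1 : (p :: a :: t).toFinset.card = (a :: t).toFinset.card + 1 := by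
        rw [List.toFinset_cons, Finset.card_insert_of_notMem (by simpa using hpnotin)]
      by_cases hfst : p.1 = a.1
      · have hcond : (a.1 == p.1 && a != p) = true := by
          simp [hfst.symm, bne_iff_ne, Ne.symm hpeq]
        simp only [hcond, if_true]
        rw [ih a (c0 + s2) hat]
        have hf : ((p :: a :: t).map Prod.fst).toFinset = ((a :: t).map Prod.fst).toFinset := by
          simp only [List.map_cons, List.toFinset_cons]
          rw [hfst]
          simp
        rw [hf, hcard1]
        have : s2 = 1 := rfl
        rw [this]
        push_cast
        ring
      · have hcond : (a.1 == p.1 && a != p) = false := by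
          simp [Ne.symm hfst]
        simp only [hcond, Bool.false_eq_true, if_false]
        rw [ih a c0 hat]
        have hplt : p.1 < a.1 := by
          unfold LexLe at hpa
          omega
        have hfle : ∀ x ∈ (a :: t).map Prod.fst, a.1 ≤ x := by
          intro x hx
          rcases List.mem_map.mp hx with ⟨q, hq, rfl⟩
          rcases List.mem_cons.mp hq with h | h
          · rw [h]
          · have := hax q h
            unfold LexLe at this
            omega
        have hfnot : p.1 ∉ (a :: t).map Prod.fst := by
          intro hmem
          have := hfle _ hmem
          omega
        have hcard2 : ((p :: a :: t).map Prod.fst).toFinset.card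
            = ((a :: t).map Prod.fst).toFinset.card + 1 := by
          simp only [List.map_cons]
          rw [List.toFinset_cons, Finset.card_insert_of_notMem (by simpa using hfnot)]
        rw [hcard1, hcard2]
        push_cast
        ring

theorem scan_eq (l : List (Int × Int)) (h : l.Pairwise LexLe) :
    (l.foldl scanStep (0, (none : Option (Int × Int)))).1
      = ((l.toFinset.card : Int) - ((l.map Prod.fst).toFinset.card : Int)) := by
  cases l with
  | nil => simp
  | cons p t =>
    have : (p :: t).foldl scanStep (0, none) = t.foldl scanStep (0, some p) := rfl
    rw [this, scan_some t p 0 h]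
    ring

-- ===== VERDICT (by name: the statement is the Claim_ definition above) =====
theorem room_stability_cost_spec : Claim_equal_room_stability_cost := by
  intro tt _
  unfold Spec_room_stability_cost
  have hBlist : tt.flatMap (fun periods => periods.2.flatMap (fun rooms =>
      rooms.2.filterMap (fun s => if s.2 ≠ -1 then some (s.2, s.1) else none)))
      = pairsOf (slotsOf tt) := by
    simp only [pairsOf, slotsOf, pairF, List.filterMap_flatMap]
  have hB : room_stability_cost_alt tt
      = ((PySem.List.sorted2 (pairsOf (slotsOf tt)) Prod.fst Prod.snd false).foldl
          scanStep (0, (none : Option (Int × Int)))).1 := by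
    rw [show room_stability_cost_alt tt
        = ((PySem.List.sorted2 (tt.flatMap (fun periods => periods.2.flatMap (fun rooms =>
            rooms.2.filterMap (fun s => if s.2 ≠ -1 then some (s.2, s.1) else none))))
            Prod.fst Prod.snd false).foldl scanStep (0, (none : Option (Int × Int)))).1 from rfl,
      hBlist]
  set L := pairsOf (slotsOf tt) with hL
  set S := PySem.List.sorted2 L Prod.fst Prod.snd false with hS
  have hperm : S.Perm L := PySem.List.sorted2_perm L Prod.fst Prod.snd false
  have hpwb : S.Pairwise (fun a b => lexLt b a = false) := sorted2_pairwise_lex L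
  have hpw : S.Pairwise LexLe := hpwb.imp (fun h => (lexLt_false_iff _ _).mp h)
  have hcardS : S.toFinset = L.toFinset := List.toFinset_eq_of_perm _ _ hperm
  have hcardF : (S.map Prod.fst).toFinset = (L.map Prod.fst).toFinset :=
    List.toFinset_eq_of_perm _ _ (hperm.map Prod.fst)
  rw [A_eq_sets, hB, scan_eq S hpw, hcardS, hcardF]
  obtain ⟨n1, n2, m1, m2⟩ := stepB_fold_spec (slotsOf tt)
    (PySem.Set.empty, PySem.Set.empty) List.nodup_nil List.nodup_nil
  have e1 : ((slotsOf tt).foldl stepB (PySem.Set.empty, PySem.Set.empty)).1.toFinset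
      = L.toFinset := by
    ext x
    simp only [List.mem_toFinset]
    rw [m1 x]
    simp [PySem.Set.empty, hL]
  have e2 : ((slotsOf tt).foldl stepB (PySem.Set.empty, PySem.Set.empty)).2.toFinset
      = (L.map Prod.fst).toFinset := by
    ext y
    simp only [List.mem_toFinset]
    rw [m2 y]
    simp [PySem.Set.empty, hL]
  have l1 : PySem.Set.len ((slotsOf tt).foldl stepB (PySem.Set.empty, PySem.Set.empty)).1
      = (L.toFinset.card : Int) := by
    rw [PySem.Set.len, ← List.toFinset_card_of_nodup n1, e1]
  have l2 : PySem.Set.len ((slotsOf tt).foldl stepB (PySem.Set.empty, PySem.Set.empty)).2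
      = ((L.map Prod.fst).toFinset.card : Int) := by
    rw [PySem.Set.len, ← List.toFinset_card_of_nodup n2, e2]
  rw [l1, l2]
  have : s2 = 1 := rfl
  rw [this]
  ring
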